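-- pv_equiv track=rewrite | github.com/btfranklin/compendiumscribe | src/compendiumscribe/compendium/text_utils.py | iter_markdown_links
-- ===== SOURCE A (Python) =====
-- from typing import Iterator
--
-- def iter_markdown_links(text: str) -> Iterator[tuple[int, int, str, str]]:
--     """Yield ranges and components for Markdown-style inline links."""
--
--     index = 0
--     length = len(text)
--     while index < length:
--         start = text.find("[", index)
--         if start == -1:
--             break
--
--         end_label = text.find("]", start + 1)
--         if end_label == -1:
--             break
--         if end_label + 1 >= length or text[end_label + 1] != "(":
--             index = end_label + 1
--             continue
--
--         url_start = end_label + 2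
--         depth = 1
--         position = url_start
--         while position < length and depth > 0:
--             char = text[position]
--             if char == "(":
--                 depth += 1
--             elif char == ")":
--                 depth -= 1
--                 if depth == 0:
--                     break
--             position += 1
--
--         if depth != 0:
--             break
--
--         url_end = position
--         label = text[start + 1:end_label]
--         url = text[url_start:url_end]
--         yield start, url_end + 1, label, url
--         index = url_end + 1
-- ===== SOURCE B (Python) =====
-- from typing import Iterator
--
-- def iter_markdown_links(text: str) -> Iterator[tuple[int, int, str, str]]:
--     """Yield ranges and components for Markdown-style inline links.
--
--     Single index walk with an explicit state variable instead of nested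
--     find/depth loops.
--     """
--     n = len(text)
--     pos = 0
--     state = "seek"
--     label_start = close = depth = 0
--     while pos < n:
--         ch = text[pos]
--         if state == "seek":
--             if ch == "[":
--                 state = "label"
--                 label_start = pos
--             pos += 1
--         elif state == "label":
--             if ch == "]":
--                 if pos + 1 < n and text[pos + 1] == "(":
--                     state = "url"
--                     close = pos
--                     depth = 1
--                     pos += 2
--                 else:
--                     state = "seek"
--                     pos += 1
--             else:
--                 pos += 1
--         else:  # url
--             if ch == "(":
--                 depth += 1
--             elif ch == ")":
--                 depth -= 1
--                 if depth == 0: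
--                     yield (label_start, pos + 1,
--                            text[label_start + 1:close], text[close + 2:pos])
--                     state = "seek"
--             pos += 1
--     # reaching the end while still inside a label or URL yields nothing more
-- ===== Notes on version B (the rewrite author's own statement) =====
-- stated objective: alternative
-- what changed: Replaced A's nested find-calls and inner depth loop with a single left-to-right index walk driven by an explicit SEEK/LABEL/URL state variable.
import Mathlib
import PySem

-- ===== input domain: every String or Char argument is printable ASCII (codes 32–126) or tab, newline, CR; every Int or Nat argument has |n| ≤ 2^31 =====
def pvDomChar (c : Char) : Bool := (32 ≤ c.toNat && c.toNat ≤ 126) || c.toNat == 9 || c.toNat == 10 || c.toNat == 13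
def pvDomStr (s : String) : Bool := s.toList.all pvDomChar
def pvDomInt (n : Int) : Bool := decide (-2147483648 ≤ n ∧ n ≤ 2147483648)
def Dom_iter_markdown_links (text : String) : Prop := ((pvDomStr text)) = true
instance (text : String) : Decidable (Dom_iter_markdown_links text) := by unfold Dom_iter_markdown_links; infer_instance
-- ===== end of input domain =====

-- B is a single-pass explicit state machine (SEEK/LABEL/URL) replacing A's nested find/depth loops; same values, alternative decomposition.

-- ===== PORT A =====
-- arithmetic helpers cited by the termination proofs of the loops below
theorem pvDecStep (a p : Nat) (h : p < a) : a - (p + 1) < a - p :=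
  Nat.sub_succ_lt_self a p h
theorem pvDecStep2 (a p : Nat) (h : p < a) : a - (p + 2) < a - p :=
  Nat.lt_of_le_of_lt (Nat.sub_le_sub_left (Nat.le_succ (p + 1)) a) (Nat.sub_succ_lt_self a p h)

-- helper: Python's text.find(c, i) (scan for a single character from index i; none = -1)
def findFrom (l : List Char) (c : Char) (i : Nat) : Option Nat :=
  if h : i < l.length then
    if l[i] = c then some i else findFrom l c (i + 1)
  else none
termination_by l.length - i
decreasing_by exact pvDecStep l.length i h



-- helper: A's inner paren-depth while loop; returns the break position (depth hit 0) or none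
def parenScan (l : List Char) (pos depth : Nat) : Option Nat :=
  if h : pos < l.length ∧ 0 < depth then
    if l[pos]'h.1 = '(' then parenScan l (pos + 1) (depth + 1)
    else if l[pos]'h.1 = ')' then
      if depth - 1 = 0 then some pos else parenScan l (pos + 1) (depth - 1)
    else parenScan l (pos + 1) depth
  else if depth ≠ 0 then none else some pos
termination_by l.length - pos
decreasing_by all_goals exact pvDecStep l.length pos h.1



-- A's outer while loop. It advances 'index' strictly each iteration; the extra 'fuel'
-- argument (length+1 at the entry point) is only a structural totality guard.
def aLoop (l : List Char) : Nat → Nat → List (Int × Int × String × String)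
  | 0, _ => []
  | fuel + 1, i =>
    match findFrom l '[' i with
    | none => []
    | some start =>
      match findFrom l ']' (start + 1) with
      | none => []
      | some q =>
        if q + 1 < l.length ∧ l[q + 1]! = '(' then
          match parenScan l (q + 2) 1 with
          | none => []
          | some p =>
            ((start : Int), (p : Int) + 1,
              String.ofList ((l.drop (start + 1)).take (q - (start + 1))),
              String.ofList ((l.drop (q + 2)).take (p - (q + 2)))) :: aLoop l fuel (p + 1)
        else aLoop l fuel (q + 1)

def iter_markdown_links (text : String) : List (Int × Int × String × String) :=
  aLoop text.toList (text.toList.length + 1) 0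

-- ===== PORT B =====
-- B's explicit state: scanning for '[', inside a label, or inside a URL counting parens
inductive BState where
  | seek : BState
  | label : Nat → BState
  | url : Nat → Nat → Nat → BState

-- B's single while loop: one character per step, dispatch on the state
def bLoop (l : List Char) (st : BState) (pos : Nat) : List (Int × Int × String × String) :=
  if h : pos < l.length then
    match st with
    | .seek =>
      if l[pos] = '[' then bLoop l (.label pos) (pos + 1)
      else bLoop l .seek (pos + 1)
    | .label ls =>
      if l[pos] = ']' then
        if pos + 1 < l.length ∧ l[pos + 1]! = '(' then
          bLoop l (.url ls pos 1) (pos + 2)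
        else bLoop l .seek (pos + 1)
      else bLoop l (.label ls) (pos + 1)
    | .url ls close depth =>
      if l[pos] = '(' then bLoop l (.url ls close (depth + 1)) (pos + 1)
      else if l[pos] = ')' then
        if depth - 1 = 0 then
          ((ls : Int), (pos : Int) + 1,
            String.ofList ((l.drop (ls + 1)).take (close - (ls + 1))),
            String.ofList ((l.drop (close + 2)).take (pos - (close + 2)))) :: bLoop l .seek (pos + 1)
        else bLoop l (.url ls close (depth - 1)) (pos + 1)
      else bLoop l (.url ls close depth) (pos + 1)
  else []
termination_by l.length - pos
decreasing_by
  all_goals first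
    | exact pvDecStep l.length pos h
    | exact pvDecStep2 l.length pos h

def iter_markdown_links_alt (text : String) : List (Int × Int × String × String) :=
  bLoop text.toList .seek 0

-- ===== PRECONDITION & SPEC =====
def Spec_iter_markdown_links (text : String) (out : List (Int × Int × String × String)) : Prop := out = iter_markdown_links_alt text
instance (text : String) (out : List (Int × Int × String × String)) : Decidable (Spec_iter_markdown_links text out) := by unfold Spec_iter_markdown_links; infer_instance

-- ===== CLAIM (what is proved, stated in full; the proofs are below) =====
def Claim_equal_iter_markdown_links : Prop := ∀ (text : String), Dom_iter_markdown_links text → Spec_iter_markdown_links text (iter_markdown_links text)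

-- ===== LEMMAS AND PROOFS =====

-- step equations and bounds for A's helpers
theorem findFrom_stop (l : List Char) (c : Char) (i : Nat) (h : ¬ i < l.length) :
    findFrom l c i = none := by
  conv_lhs => unfold findFrom
  rw [dif_neg h]

theorem findFrom_hit (l : List Char) (c : Char) (i : Nat) (h : i < l.length)
    (hc : l[i] = c) : findFrom l c i = some i := by
  conv_lhs => unfold findFrom
  rw [dif_pos h, if_pos hc]

theorem findFrom_miss (l : List Char) (c : Char) (i : Nat) (h : i < l.length)
    (hc : ¬ l[i] = c) : findFrom l c i = findFrom l c (i + 1) := by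
  conv_lhs => unfold findFrom
  rw [dif_pos h, if_neg hc]

theorem findFrom_bounds (l : List Char) (c : Char) :
    ∀ n i s, l.length ≤ i + n → findFrom l c i = some s → i ≤ s ∧ s < l.length := by
  intro n
  induction n with
  | zero =>
    intro i s hn h
    rw [findFrom_stop l c i (Nat.not_lt.mpr hn)] at h
    exact nomatch h
  | succ n ih =>
    intro i s hn h
    by_cases hi : i < l.length
    · by_cases hc : l[i] = c
      · rw [findFrom_hit l c i hi hc] at h
        exact Option.some.inj h ▸ And.intro (Nat.le_refl i) hi
      · rw [findFrom_miss l c i hi hc] at h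
        have hb : l.length ≤ (i + 1) + n := Nat.le_trans hn (Nat.le_of_eq (Nat.add_succ i n ▸ (Nat.succ_add i n).symm))
        have := ih (i + 1) s hb h
        exact And.intro (Nat.le_of_succ_le this.1) this.2
    · rw [findFrom_stop l c i hi] at h
      exact nomatch h

theorem parenScan_stop (l : List Char) (pos depth : Nat)
    (h : ¬ (pos < l.length ∧ 0 < depth)) :
    parenScan l pos depth = if depth ≠ 0 then none else some pos := by
  conv_lhs => unfold parenScan
  rw [dif_neg h]

theorem parenScan_open (l : List Char) (pos depth : Nat) (h : pos < l.length)
    (hd : 0 < depth) (hc : l[pos] = '(') :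
    parenScan l pos depth = parenScan l (pos + 1) (depth + 1) := by
  conv_lhs => unfold parenScan
  rw [dif_pos (And.intro h hd), if_pos hc]

theorem parenScan_close_done (l : List Char) (pos depth : Nat) (h : pos < l.length)
    (hd : 0 < depth) (hc : l[pos] = ')') (hz : depth - 1 = 0) :
    parenScan l pos depth = some pos := by
  conv_lhs => unfold parenScan
  rw [dif_pos (And.intro h hd), if_neg (by rw [hc]; decide), if_pos hc, if_pos hz]

theorem parenScan_close (l : List Char) (pos depth : Nat) (h : pos < l.length)
    (hd : 0 < depth) (hc : l[pos] = ')') (hz : ¬ depth - 1 = 0) :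
    parenScan l pos depth = parenScan l (pos + 1) (depth - 1) := by
  conv_lhs => unfold parenScan
  rw [dif_pos (And.intro h hd), if_neg (by rw [hc]; decide), if_pos hc, if_neg hz]

theorem parenScan_other (l : List Char) (pos depth : Nat) (h : pos < l.length)
    (hd : 0 < depth) (h1 : ¬ l[pos] = '(') (h2 : ¬ l[pos] = ')') :
    parenScan l pos depth = parenScan l (pos + 1) depth := by
  conv_lhs => unfold parenScan
  rw [dif_pos (And.intro h hd), if_neg h1, if_neg h2]

theorem parenScan_bounds (l : List Char) :
    ∀ n pos depth p, l.length ≤ pos + n → 0 < depth → parenScan l pos depth = some p →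
      pos ≤ p ∧ p < l.length := by
  intro n
  induction n with
  | zero =>
    intro pos depth p hn hd h
    rw [parenScan_stop l pos depth (fun hcon => absurd hcon.1 (Nat.not_lt.mpr hn)),
      if_pos (Nat.pos_iff_ne_zero.mp hd)] at h
    exact nomatch h
  | succ n ih =>
    intro pos depth p hn hd h
    have hb : l.length ≤ (pos + 1) + n := Nat.le_trans hn (Nat.le_of_eq (Nat.add_succ pos n ▸ (Nat.succ_add pos n).symm))
    by_cases hp : pos < l.length
    · by_cases h1 : l[pos] = '('
      · rw [parenScan_open l pos depth hp hd h1] at h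
        have := ih (pos + 1) (depth + 1) p hb (Nat.succ_pos depth) h
        exact And.intro (Nat.le_of_succ_le this.1) this.2
      · by_cases h2 : l[pos] = ')'
        · by_cases h3 : depth - 1 = 0
          · rw [parenScan_close_done l pos depth hp hd h2 h3] at h
            exact Option.some.inj h ▸ And.intro (Nat.le_refl pos) hp
          · rw [parenScan_close l pos depth hp hd h2 h3] at h
            have := ih (pos + 1) (depth - 1) p hb (Nat.pos_of_ne_zero h3) h
            exact And.intro (Nat.le_of_succ_le this.1) this.2
        · rw [parenScan_other l pos depth hp hd h1 h2] at h
          have := ih (pos + 1) depth p hb hd h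
          exact And.intro (Nat.le_of_succ_le this.1) this.2
    · rw [parenScan_stop l pos depth (fun hcon => absurd hcon.1 hp),
        if_pos (Nat.pos_iff_ne_zero.mp hd)] at h
      exact nomatch h


-- step equations for bLoop
theorem bLoop_stop (l : List Char) (st : BState) (pos : Nat) (h : ¬ pos < l.length) :
    bLoop l st pos = [] := by
  conv_lhs => unfold bLoop
  rw [dif_neg h]

theorem bLoop_seek_hit (l : List Char) (pos : Nat) (h : pos < l.length)
    (hc : l[pos] = '[') : bLoop l .seek pos = bLoop l (.label pos) (pos + 1) := by
  conv_lhs => unfold bLoop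
  rw [dif_pos h]
  simp only [hc, if_true]

theorem bLoop_seek_miss (l : List Char) (pos : Nat) (h : pos < l.length)
    (hc : ¬ l[pos] = '[') : bLoop l .seek pos = bLoop l .seek (pos + 1) := by
  conv_lhs => unfold bLoop
  rw [dif_pos h]
  simp only [hc, if_false]

theorem bLoop_label_hit (l : List Char) (ls pos : Nat) (h : pos < l.length)
    (hc : l[pos] = ']') :
    bLoop l (.label ls) pos =
      if pos + 1 < l.length ∧ l[pos + 1]! = '(' then bLoop l (.url ls pos 1) (pos + 2)
      else bLoop l .seek (pos + 1) := by
  conv_lhs => unfold bLoop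
  rw [dif_pos h]
  simp only [hc, if_true]

theorem bLoop_label_miss (l : List Char) (ls pos : Nat) (h : pos < l.length)
    (hc : ¬ l[pos] = ']') : bLoop l (.label ls) pos = bLoop l (.label ls) (pos + 1) := by
  conv_lhs => unfold bLoop
  rw [dif_pos h]
  simp only [hc, if_false]

theorem bLoop_url_open (l : List Char) (ls close depth pos : Nat) (h : pos < l.length)
    (hc : l[pos] = '(') :
    bLoop l (.url ls close depth) pos = bLoop l (.url ls close (depth + 1)) (pos + 1) := by
  conv_lhs => unfold bLoop
  rw [dif_pos h]
  simp only [hc, if_true]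

theorem bLoop_url_close_done (l : List Char) (ls close depth pos : Nat) (h : pos < l.length)
    (hc : l[pos] = ')') (hz : depth - 1 = 0) :
    bLoop l (.url ls close depth) pos =
      ((ls : Int), (pos : Int) + 1,
        String.ofList ((l.drop (ls + 1)).take (close - (ls + 1))),
        String.ofList ((l.drop (close + 2)).take (pos - (close + 2)))) :: bLoop l .seek (pos + 1) := by
  conv_lhs => unfold bLoop
  rw [dif_pos h]
  simp [hc, hz]

theorem bLoop_url_close (l : List Char) (ls close depth pos : Nat) (h : pos < l.length)
    (hc : l[pos] = ')') (hz : ¬ depth - 1 = 0) :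
    bLoop l (.url ls close depth) pos = bLoop l (.url ls close (depth - 1)) (pos + 1) := by
  conv_lhs => unfold bLoop
  rw [dif_pos h]
  simp [hc, hz]

theorem bLoop_url_other (l : List Char) (ls close depth pos : Nat) (h : pos < l.length)
    (h1 : ¬ l[pos] = '(') (h2 : ¬ l[pos] = ')') :
    bLoop l (.url ls close depth) pos = bLoop l (.url ls close depth) (pos + 1) := by
  conv_lhs => unfold bLoop
  rw [dif_pos h]
  simp only [h1, h2, if_false]

-- step equations for aLoop
theorem aLoop_none (l : List Char) (fuel i : Nat) (hs : findFrom l '[' i = none) :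
    aLoop l (fuel + 1) i = [] := by
  conv_lhs => unfold aLoop
  simp only [hs]

theorem aLoop_noclose (l : List Char) (fuel i s : Nat) (hs : findFrom l '[' i = some s)
    (hq : findFrom l ']' (s + 1) = none) : aLoop l (fuel + 1) i = [] := by
  conv_lhs => unfold aLoop
  simp only [hs, hq]

theorem aLoop_some (l : List Char) (fuel i s q : Nat) (hs : findFrom l '[' i = some s)
    (hq : findFrom l ']' (s + 1) = some q) :
    aLoop l (fuel + 1) i =
      if q + 1 < l.length ∧ l[q + 1]! = '(' then
        match parenScan l (q + 2) 1 with
        | none => []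
        | some p =>
          ((s : Int), (p : Int) + 1,
            String.ofList ((l.drop (s + 1)).take (q - (s + 1))),
            String.ofList ((l.drop (q + 2)).take (p - (q + 2)))) :: aLoop l fuel (p + 1)
      else aLoop l fuel (q + 1) := by
  conv_lhs => unfold aLoop
  simp only [hs, hq]

-- B's SEEK phase computes A's find('[', i)
theorem bLoop_seek_spec (l : List Char) :
    ∀ n i, l.length - i ≤ n →
      bLoop l .seek i =
        match findFrom l '[' i with
        | none => []
        | some s => bLoop l (.label s) (s + 1) := by
  intro n
  induction n with
  | zero =>
    intro i hn
    rw [bLoop_stop l _ i (by omega), findFrom_stop l _ i (by omega)]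
  | succ n ih =>
    intro i hn
    by_cases hi : i < l.length
    · by_cases hc : l[i] = '['
      · rw [bLoop_seek_hit l i hi hc, findFrom_hit l _ i hi hc]
      · rw [bLoop_seek_miss l i hi hc, findFrom_miss l _ i hi hc, ih (i + 1) (by omega)]
    · rw [bLoop_stop l _ i hi, findFrom_stop l _ i hi]

-- B's LABEL phase computes A's find(']', j) and branches like A
theorem bLoop_label_spec (l : List Char) (ls : Nat) :
    ∀ n j, l.length - j ≤ n →
      bLoop l (.label ls) j =
        match findFrom l ']' j with
        | none => []
        | some q =>
          if q + 1 < l.length ∧ l[q + 1]! = '(' then bLoop l (.url ls q 1) (q + 2)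
          else bLoop l .seek (q + 1) := by
  intro n
  induction n with
  | zero =>
    intro j hn
    rw [bLoop_stop l _ j (by omega), findFrom_stop l _ j (by omega)]
  | succ n ih =>
    intro j hn
    by_cases hj : j < l.length
    · by_cases hc : l[j] = ']'
      · rw [bLoop_label_hit l ls j hj hc, findFrom_hit l _ j hj hc]
      · rw [bLoop_label_miss l ls j hj hc, findFrom_miss l _ j hj hc, ih (j + 1) (by omega)]
    · rw [bLoop_stop l _ j hj, findFrom_stop l _ j hj]

-- B's URL phase computes A's paren-depth scan
theorem bLoop_url_spec (l : List Char) (ls close : Nat) :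
    ∀ n pos depth, l.length - pos ≤ n → 0 < depth →
      bLoop l (.url ls close depth) pos =
        match parenScan l pos depth with
        | none => []
        | some p =>
          ((ls : Int), (p : Int) + 1,
            String.ofList ((l.drop (ls + 1)).take (close - (ls + 1))),
            String.ofList ((l.drop (close + 2)).take (p - (close + 2)))) :: bLoop l .seek (p + 1) := by
  intro n
  induction n with
  | zero =>
    intro pos depth hn hd
    rw [bLoop_stop l _ pos (by omega), parenScan_stop l pos depth (by omega), if_pos (by omega)]
  | succ n ih =>
    intro pos depth hn hd
    by_cases hp : pos < l.length
    · by_cases h1 : l[pos] = '('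
      · rw [bLoop_url_open l ls close depth pos hp h1, parenScan_open l pos depth hp hd h1,
          ih (pos + 1) (depth + 1) (by omega) (by omega)]
      · by_cases h2 : l[pos] = ')'
        · by_cases h3 : depth - 1 = 0
          · rw [bLoop_url_close_done l ls close depth pos hp h2 h3,
              parenScan_close_done l pos depth hp hd h2 h3]
          · rw [bLoop_url_close l ls close depth pos hp h2 h3,
              parenScan_close l pos depth hp hd h2 h3,
              ih (pos + 1) (depth - 1) (by omega) (by omega)]
        · rw [bLoop_url_other l ls close depth pos hp h1 h2,
            parenScan_other l pos depth hp hd h1 h2,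
            ih (pos + 1) depth (by omega) hd]
    · rw [bLoop_stop l _ pos hp, parenScan_stop l pos depth (by omega), if_pos (by omega)]

-- main loop equivalence, by induction on A's fuel
theorem aLoop_eq_bLoop (l : List Char) :
    ∀ fuel i, l.length ≤ i + fuel → aLoop l fuel i = bLoop l .seek i := by
  intro fuel
  induction fuel with
  | zero =>
    intro i hn
    rw [show aLoop l 0 i = [] from rfl,
      bLoop_seek_spec l (l.length - i) i (le_refl _), findFrom_stop l _ i (by omega)]
  | succ n ih =>
    intro i hn
    rw [bLoop_seek_spec l (l.length - i) i (le_refl _)]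
    cases hs : findFrom l '[' i with
    | none => rw [aLoop_none l n i hs]
    | some s =>
      dsimp only
      have hsb := findFrom_bounds l '[' l.length i s (Nat.le_add_left _ _) hs
      rw [bLoop_label_spec l s (l.length - (s + 1)) (s + 1) (le_refl _)]
      cases hq : findFrom l ']' (s + 1) with
      | none => rw [aLoop_noclose l n i s hs hq]
      | some q =>
        dsimp only
        have hqb := findFrom_bounds l ']' l.length (s + 1) q (Nat.le_add_left _ _) hq
        rw [aLoop_some l n i s q hs hq]
        by_cases hb : q + 1 < l.length ∧ l[q + 1]! = '('
        · rw [if_pos hb, if_pos hb,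
            bLoop_url_spec l s q (l.length - (q + 2)) (q + 2) 1 (le_refl _) (by omega)]
          cases hp : parenScan l (q + 2) 1 with
          | none => dsimp only
          | some p =>
            dsimp only
            have hpb := parenScan_bounds l l.length (q + 2) 1 p (Nat.le_add_left _ _)
              Nat.one_pos hp
            rw [ih (p + 1) (by omega)]
        · rw [if_neg hb, if_neg hb, ih (q + 1) (by omega)]

-- ===== VERDICT (by name: the statement is the Claim_ definition above) =====
theorem iter_markdown_links_spec : Claim_equal_iter_markdown_links := by
  intro text _
  unfold Spec_iter_markdown_links iter_markdown_links iter_markdown_links_alt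
  exact aLoop_eq_bLoop text.toList (text.toList.length + 1) 0 (by omega)
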